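-- pv_equiv track=rewrite | github.com/saurabh-pandey/EPIJudgeClone | epi_judge_python/smallest_subarray_covering_set_streaming.py | find_smallest_subarray_covering_set_streaming_v2
-- ===== SOURCE A (Python) =====
-- import collections
-- from typing import Any, Iterator, List, Set
--
-- Subarray = collections.namedtuple('Subarray', ('start', 'end'))
--
-- def find_smallest_subarray_covering_set_streaming_v2(
--         paragraph: Iterator[str],
--         keywords: Set[str]) -> Subarray:
--     '''
--     Book's version with O(n) time where n is paragraph size and k is size of keywords and O(k) space
--     '''
--     class Node:
--         def __init__(self, data: Any) -> None:
--             self.data: Any = data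
--             self.next: 'Node' = None
--             self.prev: 'Node' = None
--
--     class DoublyLinkedList:
--         def __init__(self) -> None:
--             self.head: Node = None
--             self.tail: Node = None
--             self._size: int = 0
--
--         def __len__(self) -> int:
--             return self._size
--
--         def insert_at_tail(self, value: int) -> None:
--             node = Node(value)
--             node.prev = self.tail
--             if self.tail:
--                 self.tail.next = node
--             else:
--                 self.head = node
--             self.tail = node
--             self._size += 1
--
--         def remove(self, node: Node) -> None:
--             if node.next:
--                 node.next.prev = node.prev
--             else:
--                 self.tail = node.prev
--             if node.prev:
--                 node.prev.next = node.next
--             else: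
--                 self.head = node.next
--             node.next = None
--             node.prev = None
--             self._size -= 1
--
--     start, end = -1, -1
--     keyword_node_map = {k: None for k in keywords}
--     index_list = DoublyLinkedList()
--     for idx, word in enumerate(paragraph):
--         if word in keyword_node_map:
--             node = keyword_node_map[word]
--             if node:
--                 index_list.remove(node)
--             index_list.insert_at_tail(idx)
--             keyword_node_map[word] = index_list.tail
--         if len(index_list) == len(keywords):
--             if (start, end) == (-1, -1):
--                 start, end = index_list.head.data, idx
--             elif idx - index_list.head.data < end - start:
--                 start, end = index_list.head.data, idx
--     return start, end
-- ===== SOURCE B (Python) =====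
-- def find_smallest_subarray_covering_set_streaming_v2(paragraph, keywords):
--     # Track only each keyword's most recent index; the window start is
--     # recomputed as min(latest.values()) -- no ordered structure maintained.
--     latest = {}
--     start, end = -1, -1
--     for idx, word in enumerate(paragraph):
--         if word in keywords:
--             latest[word] = idx
--         if len(latest) == len(keywords):
--             first = min(latest.values())
--             if (start, end) == (-1, -1) or idx - first < end - start:
--                 start, end = first, idx
--     return start, end
-- ===== Notes on version B (the rewrite author's own statement) =====
-- stated objective: simpler
-- what changed: Drops A's ordered recency structure (Node/DoublyLinkedList + keyword->node map) entirely: B keeps only a dict keyword->latest index and recomputes the window start as min(latest.values()) each time coverage is full.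
import Mathlib
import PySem

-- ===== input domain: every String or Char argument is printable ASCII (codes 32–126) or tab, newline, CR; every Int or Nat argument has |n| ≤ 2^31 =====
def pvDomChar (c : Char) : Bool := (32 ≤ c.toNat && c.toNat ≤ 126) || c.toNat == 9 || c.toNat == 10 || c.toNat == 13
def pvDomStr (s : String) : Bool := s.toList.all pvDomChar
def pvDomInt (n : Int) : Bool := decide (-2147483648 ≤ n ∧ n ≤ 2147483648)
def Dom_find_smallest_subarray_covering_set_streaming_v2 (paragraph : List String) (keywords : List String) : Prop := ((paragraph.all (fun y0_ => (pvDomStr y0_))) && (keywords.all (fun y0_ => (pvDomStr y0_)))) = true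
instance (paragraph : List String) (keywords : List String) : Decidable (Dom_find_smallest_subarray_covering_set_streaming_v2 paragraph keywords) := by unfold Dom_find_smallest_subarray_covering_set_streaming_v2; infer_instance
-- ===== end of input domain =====

-- B drops A's ordered recency structure (DLL + keyword->node map): it keeps only a dict
-- keyword -> latest index and recomputes the window start as min(latest.values()) whenever
-- coverage is full (objective: simpler). Return values agree on Pre_; no argument is mutated.

-- ===== PORT A =====
-- A DLL node is identified by its data (the indices stored are pairwise distinct), so
-- index_list is ported as a List Int: remove(node) = List.erase, insert_at_tail = ++ [idx].
-- index_list.head.data is ported as headD 0; Python reads .data of head = None (AttributeError)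
-- exactly when keywords is empty and paragraph is not — excluded by Pre_ below.
def pvAStep (K : Nat) (st : (Int × Int) × PySem.Dict String (Option Int) × List Int)
    (p : Int × String) : (Int × Int) × PySem.Dict String (Option Int) × List Int :=
  let se := st.1
  let m := st.2.1
  let lst := st.2.2
  let idx := p.1
  let word := p.2
  -- 'if word in keyword_node_map:' with the node lookup / removal / tail insert
  let ml : PySem.Dict String (Option Int) × List Int :=
    match m.get? word with
    | none => (m, lst)
    | some node =>
        (m.insert word (some idx),
         (match node with
          | some j => lst.erase j
          | none => lst) ++ [idx])
  if ml.2.length == K then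
    if se == ((-1 : Int), (-1 : Int)) then ((ml.2.headD 0, idx), ml)
    else if idx - ml.2.headD 0 < se.2 - se.1 then ((ml.2.headD 0, idx), ml)
    else (se, ml)
  else (se, ml)

def find_smallest_subarray_covering_set_streaming_v2 (paragraph : List String) (keywords : List String) : Int × Int :=
  -- keywords is a Python set: len(keywords) = number of distinct elements
  let K := (PySem.Set.ofList keywords).length
  -- keyword_node_map = {k: None for k in keywords}
  let m0 : PySem.Dict String (Option Int) :=
    keywords.foldl (fun d k => d.insert k none) PySem.Dict.empty
  ((PySem.List.enumerate paragraph 0).foldl (pvAStep K) (((-1 : Int), (-1 : Int)), m0, [])).1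

-- ===== PORT B =====
-- latest[word] = idx → d.insert word idx; min(latest.values()) is ported as
-- (PySem.List.min? d.values id).getD 0 (Python raises ValueError on an empty dict, which
-- happens exactly when keywords is empty and the paragraph is not — excluded by Pre_ below).
def pvBStep (keywords : List String) (K : Nat) (st : (Int × Int) × PySem.Dict String Int)
    (p : Int × String) : (Int × Int) × PySem.Dict String Int :=
  let se := st.1
  let idx := p.1
  let word := p.2
  let d := if keywords.contains word then st.2.insert word idx else st.2
  if d.size == K then
    let first := (PySem.List.min? d.values (fun x => x)).getD 0
    if se == ((-1 : Int), (-1 : Int)) || idx - first < se.2 - se.1 then ((first, idx), d)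
    else (se, d)
  else (se, d)

def find_smallest_subarray_covering_set_streaming_v2_alt (paragraph : List String) (keywords : List String) : Int × Int :=
  ((PySem.List.enumerate paragraph 0).foldl
    (pvBStep keywords ((PySem.Set.ofList keywords).length))
    (((-1 : Int), (-1 : Int)), PySem.Dict.empty)).1

-- ===== PRECONDITION & SPEC =====
-- Pre_ excludes only the inputs where the Python A raises (AttributeError: with empty keywords
-- and a nonempty paragraph it reads index_list.head.data of an empty list); B raises there too
-- (ValueError from min of an empty sequence).
def Pre_find_smallest_subarray_covering_set_streaming_v2 (paragraph : List String) (keywords : List String) : Prop :=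
  keywords = [] → paragraph = []
instance (paragraph : List String) (keywords : List String) : Decidable (Pre_find_smallest_subarray_covering_set_streaming_v2 paragraph keywords) := by unfold Pre_find_smallest_subarray_covering_set_streaming_v2; infer_instance

def pvWitness_find_smallest_subarray_covering_set_streaming_v2 : List String × List String :=
  (["a", "b", "a"], ["a", "b"])

def Spec_find_smallest_subarray_covering_set_streaming_v2 (paragraph : List String) (keywords : List String) (out : Int × Int) : Prop := out = find_smallest_subarray_covering_set_streaming_v2_alt paragraph keywords
instance (paragraph : List String) (keywords : List String) (out : Int × Int) : Decidable (Spec_find_smallest_subarray_covering_set_streaming_v2 paragraph keywords out) := by unfold Spec_find_smallest_subarray_covering_set_streaming_v2; infer_instance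

-- ===== CLAIM (what is proved, stated in full; the proofs are below) =====
def Claim_equal_find_smallest_subarray_covering_set_streaming_v2 : Prop := ∀ (paragraph : List String) (keywords : List String), Dom_find_smallest_subarray_covering_set_streaming_v2 paragraph keywords → Pre_find_smallest_subarray_covering_set_streaming_v2 paragraph keywords → Spec_find_smallest_subarray_covering_set_streaming_v2 paragraph keywords (find_smallest_subarray_covering_set_streaming_v2 paragraph keywords)


-- ===== LEMMAS AND PROOFS =====

-- Invariant: A's index list is a sorted permutation of B's dict values, the two maps agree,
-- and all stored indices are below the running index.
def pvInv (keywords : List String) (i : Int) (m : PySem.Dict String (Option Int))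
    (lst : List Int) (d : PySem.Dict String Int) : Prop :=
  lst.Perm d.values ∧
  (∀ k, m.contains k = keywords.contains k) ∧
  (∀ k v, m.get? k = some (some v) ↔ d.get? k = some v) ∧
  (∀ x ∈ lst, x < i) ∧
  lst.Pairwise (· < ·) ∧
  d.keys.Nodup ∧
  m.keys.Nodup

-- in-place overwrite of the unique entry keyed w: the new values are, as a multiset,
-- the old values with j removed and i appended
lemma pv_values_map_set (w : String) (j i : Int) (l : List (String × Int))
    (hk : (l.map (·.1)).Nodup) (hv : (l.map (·.2)).Nodup)
    (hf : l.find? (fun p => p.1 == w) = some (w, j)) :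
    ((l.map (fun p => if p.1 == w then (w, i) else p)).map (·.2)).Perm
      ((l.map (·.2)).erase j ++ [i]) := by
  induction l with
  | nil => simp at hf
  | cons p t ih =>
    by_cases hp : p.1 = w
    · rw [List.find?_cons_of_pos (by simp [hp])] at hf
      have hpj : p = (w, j) := by injection hf
      have hwt : w ∉ t.map (·.1) := by
        simp only [List.map_cons, List.nodup_cons, hp] at hk
        exact hk.1
      have hmt : t.map (fun p => if p.1 == w then (w, i) else p) = t := by
        have hid : ∀ q ∈ t, (if q.1 == w then (w, i) else q) = q := by
          intro q hq
          have hqw : ¬ q.1 = w := by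
            intro e; exact hwt (e ▸ List.mem_map_of_mem hq)
          simp [hqw]
        calc t.map (fun p => if p.1 == w then (w, i) else p) = t.map id :=
              List.map_congr_left hid
          _ = t := List.map_id t
      simp only [List.map_cons, BEq.rfl, if_true, hmt, hpj, List.erase_cons_head]
      exact (List.perm_append_singleton i (t.map (·.2))).symm
    · rw [List.find?_cons_of_neg (by simp [hp])] at hf
      have hjm : j ∈ t.map (·.2) := List.mem_map_of_mem (List.mem_of_find?_eq_some hf)
      have hne : ¬ p.2 = j := by
        simp only [List.map_cons, List.nodup_cons] at hv
        intro e; exact hv.1 (e ▸ hjm)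
      have hkt : (t.map (·.1)).Nodup := by
        simp only [List.map_cons, List.nodup_cons] at hk; exact hk.2
      have hvt : (t.map (·.2)).Nodup := by
        simp only [List.map_cons, List.nodup_cons] at hv; exact hv.2
      have hbp : (p.1 == w) = false := beq_false_of_ne hp
      have hbne : (p.2 == j) = false := beq_false_of_ne hne
      simp only [List.map_cons, hbp, Bool.false_eq_true, if_false, List.erase_cons, hbne,
        List.cons_append]
      exact List.Perm.cons p.2 (ih hkt hvt hf)

-- the keyword-update step preserves the invariant and keeps the lists in permutation
lemma pvUpd_rel (keywords : List String) (i : Int) (w : String)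
    (m : PySem.Dict String (Option Int)) (lst : List Int) (d : PySem.Dict String Int)
    (h : pvInv keywords i m lst d) :
    (match m.get? w with
      | none => (m, lst)
      | some node =>
          (m.insert w (some i),
           (match node with
            | some j => lst.erase j
            | none => lst) ++ [i]) : PySem.Dict String (Option Int) × List Int).2.Perm
        (if keywords.contains w then d.insert w i else d).values ∧
    pvInv keywords (i + 1)
      (match m.get? w with
        | none => (m, lst)
        | some node =>
            (m.insert w (some i),
             (match node with
              | some j => lst.erase j
              | none => lst) ++ [i]) : PySem.Dict String (Option Int) × List Int).1
      (match m.get? w with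
        | none => (m, lst)
        | some node =>
            (m.insert w (some i),
             (match node with
              | some j => lst.erase j
              | none => lst) ++ [i]) : PySem.Dict String (Option Int) × List Int).2
      (if keywords.contains w then d.insert w i else d) := by
  obtain ⟨hperm, hcon, hget, hlt, hpw, hnd, hmnd⟩ := h
  have hnodupl : lst.Nodup := hpw.imp (fun hab => ne_of_lt hab)
  cases hm : m.get? w with
  | none =>
      have hmc : m.contains w = false := by
        rw [PySem.Dict.contains_eq_isSome_get?, hm]; rfl
      have hkw : keywords.contains w = false := by rw [← hcon w]; exact hmc
      rw [hkw]
      simp only [Bool.false_eq_true, if_false]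
      refine ⟨hperm, hperm, hcon, hget, ?_, hpw, hnd, hmnd⟩
      intro x hx; exact lt_trans (hlt x hx) (by omega)
  | some node =>
      have hmc : m.contains w = true := by
        rw [PySem.Dict.contains_eq_isSome_get?, hm]; rfl
      have hkw : keywords.contains w = true := by rw [← hcon w]; exact hmc
      rw [hkw, if_pos rfl]
      have hcon' : ∀ k, (m.insert w (some i)).contains k = keywords.contains k := by
        intro k
        rw [PySem.Dict.contains_insert]
        by_cases hk : k = w
        · subst hk; simpa using hkw
        · simp [beq_false_of_ne hk, hcon k]
      have hget' : ∀ k v, (m.insert w (some i)).get? k = some (some v) ↔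
          (d.insert w i).get? k = some v := by
        intro k v
        by_cases hk : k = w
        · subst hk
          rw [PySem.Dict.get?_insert_self, PySem.Dict.get?_insert_self]
          simp
        · rw [PySem.Dict.get?_insert_of_ne _ _ hk, PySem.Dict.get?_insert_of_ne _ _ hk]
          exact hget k v
      have hndk' : (d.insert w i).keys.Nodup := PySem.Dict.nodup_keys_insert d w i hnd
      have hmnd' : (m.insert w (some i)).keys.Nodup := by
        rw [PySem.Dict.keys_insert_of_contains _ _ hmc]; exact hmnd
      obtain _ | j := node
      · -- node is None: w not yet in d, insert appends (w, i)
        have hdw : d.get? w = none := by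
          cases hd : d.get? w with
          | none => rfl
          | some v =>
              have hx := (hget w v).mpr hd
              rw [hm] at hx
              cases hx
        have hdc : d.contains w = false := by
          rw [PySem.Dict.contains_eq_isSome_get?, hdw]; rfl
        have hvals : (d.insert w i).values = d.values ++ [i] := by
          simp [PySem.Dict.values, PySem.Dict.items_insert_of_not_contains _ _ hdc]
        have hperm' : (lst ++ [i]).Perm (d.insert w i).values := by
          rw [hvals]; exact hperm.append_right [i]
        refine ⟨hperm', hperm', hcon', hget', ?_, ?_, hndk', hmnd'⟩
        · intro x hx
          rcases List.mem_append.mp hx with hx | hx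
          · exact lt_trans (hlt x hx) (by omega)
          · simp at hx; omega
        · rw [List.pairwise_append]
          exact ⟨hpw, List.pairwise_singleton _ _, fun a ha b hb => by
            simp at hb; subst hb; exact hlt a ha⟩
      · -- node carries index j: A erases j and appends i; B overwrites w's slot in place
        have hdw : d.get? w = some j := (hget w j).mp hm
        have hdc : d.contains w = true := by
          rw [PySem.Dict.contains_eq_isSome_get?, hdw]; rfl
        have hfind : d.items.find? (fun p => p.1 == w) = some (w, j) := by
          simp only [PySem.Dict.get?] at hdw
          cases hf : d.items.find? (fun p => p.1 == w) with
          | none => rw [hf] at hdw; simp at hdw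
          | some p =>
              rw [hf] at hdw
              have hp2 : p.2 = j := by simpa using hdw
              have hp1 : p.1 = w := by
                have hsp := List.find?_eq_some_iff_append.mp hf
                simpa using hsp.1
              exact congrArg some (Prod.ext hp1 hp2)
        have hvn : (d.items.map (·.2)).Nodup := by
          have : d.values.Nodup := hperm.nodup_iff.mp hnodupl
          simpa [PySem.Dict.values] using this
        have hvals : ((d.insert w i).values).Perm ((d.values.erase j) ++ [i]) := by
          have := pv_values_map_set w j i d.items hnd hvn hfind
          simpa [PySem.Dict.values, PySem.Dict.items_insert_of_contains _ _ hdc] using this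
        have hperm' : (lst.erase j ++ [i]).Perm (d.insert w i).values := by
          refine List.Perm.trans ?_ hvals.symm
          exact (hperm.erase j).append_right [i]
        refine ⟨hperm', hperm', hcon', hget', ?_, ?_, hndk', hmnd'⟩
        · intro x hx
          rcases List.mem_append.mp hx with hx | hx
          · exact lt_trans (hlt x (List.erase_sublist.mem hx)) (by omega)
          · simp at hx; omega
        · rw [List.pairwise_append]
          refine ⟨hpw.sublist List.erase_sublist, List.pairwise_singleton _ _, ?_⟩
          intro a ha b hb
          simp at hb; subst hb
          exact hlt a (List.erase_sublist.mem ha)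

-- the head of A's sorted list is the minimum of B's dict values
lemma pv_min_headD (lst vs : List Int) (hpw : lst.Pairwise (· < ·)) (hperm : lst.Perm vs) :
    (PySem.List.min? vs (fun x => x)).getD 0 = lst.headD 0 := by
  cases lst with
  | nil =>
      have hvs : vs = [] := hperm.symm.eq_nil
      subst hvs
      rw [(PySem.List.min?_eq_none_iff _ _).mpr rfl]
      rfl
  | cons h t =>
      have hne : vs ≠ [] := by
        intro e; exact absurd (hperm.trans (e ▸ List.Perm.refl _)).eq_nil (by simp)
      cases hmin : PySem.List.min? vs (fun x => x) with
      | none => exact absurd ((PySem.List.min?_eq_none_iff _ _).mp hmin) hne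
      | some mv =>
          have hmem : mv ∈ vs := PySem.List.min?_mem hmin
          have hmlst : mv ∈ h :: t := hperm.mem_iff.mpr hmem
          have hhm : h ≤ mv := by
            rcases List.mem_cons.mp hmlst with e | ht
            · omega
            · exact le_of_lt ((List.pairwise_cons.mp hpw).1 mv ht)
          have hmh : mv ≤ h := by
            have hh : h ∈ vs := hperm.mem_iff.mp (List.mem_cons_self)
            exact PySem.List.min?_isMin hmin h hh
          have : mv = h := le_antisymm hmh hhm
          simp [this]

-- the selection of the new (start, end): A's if/elif chain vs B's single 'or' condition
def pvSelA (K : Nat) (se : Int × Int) (i : Int) (lst : List Int) : Int × Int :=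
  if lst.length == K then
    if se == ((-1 : Int), (-1 : Int)) then (lst.headD 0, i)
    else if i - lst.headD 0 < se.2 - se.1 then (lst.headD 0, i)
    else se
  else se

def pvSelB (K : Nat) (se : Int × Int) (i : Int) (d : PySem.Dict String Int) : Int × Int :=
  if d.size == K then
    if se == ((-1 : Int), (-1 : Int)) || i - (PySem.List.min? d.values (fun x => x)).getD 0 < se.2 - se.1 then
      ((PySem.List.min? d.values (fun x => x)).getD 0, i)
    else se
  else se

lemma pvSel_eq (K : Nat) (se : Int × Int) (i : Int) (lst : List Int) (d : PySem.Dict String Int)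
    (hpw : lst.Pairwise (· < ·)) (hperm : lst.Perm d.values) :
    pvSelA K se i lst = pvSelB K se i d := by
  have hlen : lst.length = d.size := by
    rw [hperm.length_eq]; simp [PySem.Dict.values, PySem.Dict.size]
  have hmin := pv_min_headD lst d.values hpw hperm
  simp only [pvSelA, pvSelB, hlen, hmin]
  by_cases hfull : (d.size == K) = true
  · rw [if_pos hfull, if_pos hfull]
    by_cases h1 : (se == ((-1 : Int), (-1 : Int))) = true
    · simp [h1]
    · rw [if_neg (by simpa using h1)]
      by_cases h2 : i - lst.headD 0 < se.2 - se.1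
      · rw [if_pos h2, if_pos (by simp only [Bool.or_eq_true, h1, decide_eq_true_eq]; right; exact h2)]
      · rw [if_neg h2, if_neg (by simp only [Bool.or_eq_true, decide_eq_true_eq]; rintro (hx | hx); exacts [h1 hx, h2 hx])]
  · rw [if_neg hfull, if_neg hfull]

lemma pvStep_eq (keywords : List String) (K : Nat) (i : Int) (w : String) (se : Int × Int)
    (m : PySem.Dict String (Option Int)) (lst : List Int) (d : PySem.Dict String Int)
    (h : pvInv keywords i m lst d) :
    (pvAStep K (se, m, lst) (i, w)).1 = (pvBStep keywords K (se, d) (i, w)).1 ∧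
    pvInv keywords (i + 1) (pvAStep K (se, m, lst) (i, w)).2.1
      (pvAStep K (se, m, lst) (i, w)).2.2 (pvBStep keywords K (se, d) (i, w)).2 := by
  obtain ⟨hperm2, hinv⟩ := pvUpd_rel keywords i w m lst d h
  have hA1 : (pvAStep K (se, m, lst) (i, w)).1
      = pvSelA K se i (pvAStep K (se, m, lst) (i, w)).2.2 := by
    simp only [pvAStep, pvSelA]
    split_ifs <;> rfl
  have hB2 : (pvBStep keywords K (se, d) (i, w)).2
      = (if keywords.contains w then d.insert w i else d) := by
    simp only [pvBStep]
    split_ifs <;> rfl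
  have hB1 : (pvBStep keywords K (se, d) (i, w)).1
      = pvSelB K se i (pvBStep keywords K (se, d) (i, w)).2 := by
    simp only [pvBStep, pvSelB]
    split_ifs <;> rfl
  have hA2m : (pvAStep K (se, m, lst) (i, w)).2.1
      = (match m.get? w with
          | none => (m, lst)
          | some node =>
              (m.insert w (some i),
               (match node with
                | some j => lst.erase j
                | none => lst) ++ [i]) : PySem.Dict String (Option Int) × List Int).1 := by
    simp only [pvAStep]
    split_ifs <;> rfl
  have hA2l : (pvAStep K (se, m, lst) (i, w)).2.2
      = (match m.get? w with
          | none => (m, lst)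
          | some node =>
              (m.insert w (some i),
               (match node with
                | some j => lst.erase j
                | none => lst) ++ [i]) : PySem.Dict String (Option Int) × List Int).2 := by
    simp only [pvAStep]
    split_ifs <;> rfl
  have hpw' : (pvAStep K (se, m, lst) (i, w)).2.2.Pairwise (· < ·) := by
    rw [hA2l]
    exact hinv.2.2.2.2.1
  constructor
  · rw [hA1, hB1, hB2]
    refine pvSel_eq K se i _ _ hpw' ?_
    rw [hA2l]
    exact hperm2
  · rw [hA2m, hA2l, hB2]
    exact hinv

lemma pvLoop_eq (keywords : List String) (K : Nat) (para : List String) :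
    ∀ (i : Int) (se : Int × Int) (m : PySem.Dict String (Option Int)) (lst : List Int)
      (d : PySem.Dict String Int), pvInv keywords i m lst d →
      ((PySem.List.enumerate para i).foldl (pvAStep K) (se, m, lst)).1
        = ((PySem.List.enumerate para i).foldl (pvBStep keywords K) (se, d)).1 := by
  induction para with
  | nil => intro i se m lst d _; simp [PySem.List.enumerate]
  | cons wrd rest ih =>
      intro i se m lst d h
      simp only [PySem.List.enumerate_cons, List.foldl_cons]
      obtain ⟨h1, h2⟩ := pvStep_eq keywords K i wrd se m lst d h
      rw [show (pvAStep K (se, m, lst) (i, wrd))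
            = ((pvAStep K (se, m, lst) (i, wrd)).1, (pvAStep K (se, m, lst) (i, wrd)).2.1,
               (pvAStep K (se, m, lst) (i, wrd)).2.2) from rfl,
          show (pvBStep keywords K (se, d) (i, wrd))
            = ((pvBStep keywords K (se, d) (i, wrd)).1, (pvBStep keywords K (se, d) (i, wrd)).2) from rfl,
          h1]
      exact ih (i + 1) _ _ _ _ h2

lemma pv_m0_get? (l : List String) :
    ∀ (d : PySem.Dict String (Option Int)),
      (∀ k, d.get? k = none ∨ d.get? k = some none) →
      ∀ k, (l.foldl (fun d k => d.insert k none) d).get? k = none ∨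
           (l.foldl (fun d k => d.insert k none) d).get? k = some none := by
  induction l with
  | nil => intro d h k; exact h k
  | cons x t ih =>
      intro d h k
      refine ih _ ?_ k
      intro k'
      rw [PySem.Dict.get?_insert]
      by_cases hx : k' = x
      · simp [hx]
      · simp only [if_neg hx]; exact h k'

lemma pvInv_init (keywords : List String) :
    pvInv keywords 0 (keywords.foldl (fun d k => d.insert k none) PySem.Dict.empty) []
      PySem.Dict.empty := by
  refine ⟨by simp [PySem.Dict.values, PySem.Dict.empty], ?_, ?_, by simp, List.Pairwise.nil, ?_, ?_⟩
  · intro k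
    rw [PySem.Dict.contains_eq_decide_mem_keys, PySem.Dict.keys_foldl_insert]
    simp [PySem.Set.mem_ofList, PySem.Set.update_nil_left]
  · intro k v
    have hk := pv_m0_get? keywords PySem.Dict.empty
      (fun k => Or.inl (PySem.Dict.get?_empty k)) k
    constructor
    · intro hx
      rcases hk with hk | hk <;> rw [hk] at hx <;> simp at hx
    · intro hx
      rw [PySem.Dict.get?_empty] at hx
      simp at hx
  · simp [PySem.Dict.keys_empty]
  · exact PySem.Dict.nodup_keys_foldl_insert keywords _ _ PySem.Dict.nodup_keys_empty

-- ===== VERDICT (by name: the statement is the Claim_ definition above) =====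
theorem find_smallest_subarray_covering_set_streaming_v2_spec : Claim_equal_find_smallest_subarray_covering_set_streaming_v2 := by
  intro paragraph keywords _ _
  unfold Spec_find_smallest_subarray_covering_set_streaming_v2
  unfold find_smallest_subarray_covering_set_streaming_v2 find_smallest_subarray_covering_set_streaming_v2_alt
  exact pvLoop_eq keywords _ paragraph 0 _ _ _ _ (pvInv_init keywords)
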